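-- pv_equiv track=rewrite | github.com/davedhruvansh/Hash-Hunter | hashcracker/modules/mutations.py | _toggle_patterns
-- ===== SOURCE A (Python) =====
-- from typing import Generator, Set, List
--
-- def _toggle_patterns(word: str) -> List[str]:
--     """
--     Common toggle-case patterns:
--       PaSsWoRd  — alternating from index 0
--       pAsSwOrD  — alternating from index 1
--       PASSword  — first half upper
--       passWORD  — second half upper
--       PaSs      — first half alternating
--     """
--     w = word.lower()
--     n = len(w)
--     patterns = []
--
--     # Alternating from index 0: PaSsWoRd
--     p1 = "".join(c.upper() if i % 2 == 0 else c for i, c in enumerate(w))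
--     # Alternating from index 1: pAsSwOrD
--     p2 = "".join(c.upper() if i % 2 == 1 else c for i, c in enumerate(w))
--     # First half upper: PASSword
--     mid = max(1, n // 2)
--     p3 = w[:mid].upper() + w[mid:]
--     # Second half upper: passWORD
--     p4 = w[:mid] + w[mid:].upper()
--     # First char + last char upper
--     if n >= 2:
--         p5 = w[0].upper() + w[1:-1] + w[-1].upper()
--     else:
--         p5 = w.upper()
--
--     for p in [p1, p2, p3, p4, p5]:
--         if p != w and p != w.upper() and p != w.capitalize():
--             patterns.append(p)
--
--     return patterns
-- ===== SOURCE B (Python) =====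
-- from typing import List
--
-- def _toggle_patterns(word: str) -> List[str]:
--     """Single combined pass: build all five toggle patterns in one loop over the
--     characters, then filter out the trivial forms."""
--     w = word.lower()
--     n = len(w)
--     mid = max(1, n // 2)
--     l1, l2, l3, l4, l5 = [], [], [], [], []
--     for i, c in enumerate(w):
--         l1.append(c.upper() if i % 2 == 0 else c)
--         l2.append(c.upper() if i % 2 == 1 else c)
--         l3.append(c.upper() if i < mid else c)
--         l4.append(c.upper() if i >= mid else c)
--         l5.append(c.upper() if (i == 0 or i == n - 1) else c)
--     out = []
--     for p in ("".join(l1), "".join(l2), "".join(l3), "".join(l4), "".join(l5)):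
--         if p != w and p != w.upper() and p != w.capitalize():
--             out.append(p)
--     return out
-- ===== Notes on version B (the rewrite author's own statement) =====
-- stated objective: alternative
-- what changed: Replaces the five independent per-pattern string scans (two enumerate-joins, slice concatenations, indexed first/last splice) by ONE combined pass over the characters that appends to five accumulator lists under per-index rules, joined and filtered at the end.
import Mathlib
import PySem

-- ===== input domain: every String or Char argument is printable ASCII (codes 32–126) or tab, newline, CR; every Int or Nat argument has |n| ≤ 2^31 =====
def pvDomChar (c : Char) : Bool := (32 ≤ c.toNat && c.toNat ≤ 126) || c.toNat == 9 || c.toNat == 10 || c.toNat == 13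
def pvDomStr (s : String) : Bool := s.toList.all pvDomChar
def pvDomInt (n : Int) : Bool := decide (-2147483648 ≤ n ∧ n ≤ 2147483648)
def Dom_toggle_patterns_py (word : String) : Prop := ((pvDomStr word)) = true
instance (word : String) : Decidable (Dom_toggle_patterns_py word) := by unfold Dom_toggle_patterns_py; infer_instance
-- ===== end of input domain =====

-- B replaces A's five independent per-pattern scans by one combined pass with five
-- accumulator lists (objective: alternative decomposition, same cost).

-- ===== PORT A =====

-- str.capitalize(): first char upper, rest lowered (exact on ASCII); used by both Pythons.
def pyCapitalize (cs : List Char) : List Char :=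
  match cs with
  | [] => []
  | c :: t => PySem.Chars.upperChar c :: PySem.Chars.lower t

-- w[0].upper() + w[1:-1] + w[-1].upper(); the two Option arguments come from pyGet? and are
-- both `some` under the caller's n ≥ 2 guard, so the `[]` arm is unreachable.
def pyFirstLast (a? b? : Option Char) (midpart : List Char) : List Char :=
  match a?, b? with
  | some a, some b => [PySem.Chars.upperChar a] ++ midpart ++ [PySem.Chars.upperChar b]
  | _, _ => []

def toggle_patterns_py (word : String) : List String :=
  let w : List Char := PySem.Chars.lower word.toList
  let n : Int := (w.length : Int)
  -- p1: alternating from index 0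
  let p1 : List Char :=
    (PySem.List.enumerate w 0).map
      (fun ic => if PySem.Int.mod ic.1 2 == 0 then PySem.Chars.upperChar ic.2 else ic.2)
  -- p2: alternating from index 1
  let p2 : List Char :=
    (PySem.List.enumerate w 0).map
      (fun ic => if PySem.Int.mod ic.1 2 == 1 then PySem.Chars.upperChar ic.2 else ic.2)
  let mid : Int := max 1 (PySem.Int.floordiv n 2)
  -- p3: first half upper
  let p3 : List Char :=
    PySem.Chars.upper (PySem.List.slice w none (some mid)) ++ PySem.List.slice w (some mid) none
  -- p4: second half upper
  let p4 : List Char :=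
    PySem.List.slice w none (some mid) ++ PySem.Chars.upper (PySem.List.slice w (some mid) none)
  -- p5: first and last char upper
  let p5 : List Char :=
    if 2 ≤ n then
      pyFirstLast (PySem.List.pyGet? w 0) (PySem.List.pyGet? w (-1))
        (PySem.List.slice w (some 1) (some (-1)))
    else PySem.Chars.upper w
  let patterns : List (List Char) :=
    [p1, p2, p3, p4, p5].foldl
      (fun acc p =>
        if p ≠ w ∧ p ≠ PySem.Chars.upper w ∧ p ≠ pyCapitalize w then acc ++ [p] else acc) []
  patterns.map String.ofList

-- ===== PORT B =====

def toggle_patterns_py_alt (word : String) : List String :=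
  let w : List Char := PySem.Chars.lower word.toList
  let n : Int := (w.length : Int)
  let mid : Int := max 1 (PySem.Int.floordiv n 2)
  -- one combined pass appending to five accumulator lists
  let ls : List Char × List Char × List Char × List Char × List Char :=
    (PySem.List.enumerate w 0).foldl
      (fun acc ic =>
        (acc.1 ++ [if PySem.Int.mod ic.1 2 == 0 then PySem.Chars.upperChar ic.2 else ic.2],
         acc.2.1 ++ [if PySem.Int.mod ic.1 2 == 1 then PySem.Chars.upperChar ic.2 else ic.2],
         acc.2.2.1 ++ [if ic.1 < mid then PySem.Chars.upperChar ic.2 else ic.2],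
         acc.2.2.2.1 ++ [if mid ≤ ic.1 then PySem.Chars.upperChar ic.2 else ic.2],
         acc.2.2.2.2 ++ [if ic.1 == 0 || ic.1 == n - 1 then PySem.Chars.upperChar ic.2 else ic.2]))
      ([], [], [], [], [])
  let out : List (List Char) :=
    [ls.1, ls.2.1, ls.2.2.1, ls.2.2.2.1, ls.2.2.2.2].foldl
      (fun acc p =>
        if p ≠ w ∧ p ≠ PySem.Chars.upper w ∧ p ≠ pyCapitalize w then acc ++ [p] else acc) []
  out.map String.ofList

-- ===== PRECONDITION & SPEC =====
def Spec_toggle_patterns_py (word : String) (out : List String) : Prop := out = toggle_patterns_py_alt word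
instance (word : String) (out : List String) : Decidable (Spec_toggle_patterns_py word out) := by unfold Spec_toggle_patterns_py; infer_instance

-- ===== CLAIM (what is proved, stated in full; the proofs are below) =====
def Claim_equal_toggle_patterns_py : Prop := ∀ (word : String), Dom_toggle_patterns_py word → Spec_toggle_patterns_py word (toggle_patterns_py word)

-- ===== LEMMAS AND PROOFS =====

-- below an index threshold that never fires, the upper-casing map is the identity
theorem map_enum_if_lt_of_le (l : List Char) (s t : Int) (h : t ≤ s) :
    (PySem.List.enumerate l s).map
      (fun ic => if ic.1 < t then PySem.Chars.upperChar ic.2 else ic.2) = l := by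
  induction l generalizing s with
  | nil => rfl
  | cons c l ih =>
    rw [PySem.List.enumerate_cons]
    simp only [List.map_cons]
    rw [if_neg (by omega), ih (s+1) (by omega)]

theorem map_enum_if_lt (l : List Char) (m : Nat) (s : Int) :
    (PySem.List.enumerate l s).map
      (fun ic => if ic.1 < s + (m : Int) then PySem.Chars.upperChar ic.2 else ic.2) =
      (l.take m).map PySem.Chars.upperChar ++ l.drop m := by
  induction l generalizing m s with
  | nil => simp
  | cons c l ih =>
    rw [PySem.List.enumerate_cons]
    cases m with
    | zero =>
      simp only [Nat.cast_zero, add_zero, List.take_zero, List.map_nil, List.drop_zero,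
        List.nil_append, List.map_cons]
      rw [if_neg (by omega), map_enum_if_lt_of_le l (s+1) s (by omega)]
    | succ m =>
      simp only [List.map_cons, List.take_succ_cons, List.drop_succ_cons]
      rw [if_pos (by push_cast; omega)]
      have := ih m (s+1)
      rw [show s + 1 + (m : Int) = s + ((m+1 : Nat) : Int) by push_cast; omega] at this
      rw [this]
      simp

theorem map_enum_if_lt_zero (l : List Char) (m : Nat) :
    (PySem.List.enumerate l 0).map
      (fun ic => if ic.1 < (m : Int) then PySem.Chars.upperChar ic.2 else ic.2) =
      (l.take m).map PySem.Chars.upperChar ++ l.drop m := by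
  have := map_enum_if_lt l m 0
  rw [zero_add] at this
  exact this

theorem map_enum_if_ge_of_le (l : List Char) (s t : Int) (h : t ≤ s) :
    (PySem.List.enumerate l s).map
      (fun ic => if t ≤ ic.1 then PySem.Chars.upperChar ic.2 else ic.2) =
      l.map PySem.Chars.upperChar := by
  induction l generalizing s with
  | nil => rfl
  | cons c l ih =>
    rw [PySem.List.enumerate_cons]
    simp only [List.map_cons]
    rw [if_pos (by omega), ih (s+1) (by omega)]

theorem map_enum_if_ge (l : List Char) (m : Nat) (s : Int) :
    (PySem.List.enumerate l s).map
      (fun ic => if s + (m : Int) ≤ ic.1 then PySem.Chars.upperChar ic.2 else ic.2) =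
      l.take m ++ (l.drop m).map PySem.Chars.upperChar := by
  induction l generalizing m s with
  | nil => simp
  | cons c l ih =>
    rw [PySem.List.enumerate_cons]
    cases m with
    | zero =>
      simp only [Nat.cast_zero, add_zero, List.take_zero, List.drop_zero, List.nil_append,
        List.map_cons]
      rw [if_pos (by omega), map_enum_if_ge_of_le l (s+1) s (by omega)]
    | succ m =>
      simp only [List.map_cons, List.take_succ_cons, List.drop_succ_cons]
      rw [if_neg (by push_cast; omega)]
      have := ih m (s+1)
      rw [show s + 1 + (m : Int) = s + ((m+1 : Nat) : Int) by push_cast; omega] at this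
      rw [this, List.cons_append]

theorem map_enum_if_ge_zero (l : List Char) (m : Nat) :
    (PySem.List.enumerate l 0).map
      (fun ic => if (m : Int) ≤ ic.1 then PySem.Chars.upperChar ic.2 else ic.2) =
      l.take m ++ (l.drop m).map PySem.Chars.upperChar := by
  have := map_enum_if_ge l m 0
  rw [zero_add] at this
  exact this

-- 'first-or-last index' rule on a suffix that starts at index s ≥ 1
theorem map_enum_ends (t : List Char) (s : Int) (hs : 1 ≤ s) :
    (PySem.List.enumerate t s).map
      (fun ic => if ic.1 == 0 || ic.1 == s + (t.length : Int) - 1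
                 then PySem.Chars.upperChar ic.2 else ic.2) =
      t.dropLast ++ (t.getLast?.map PySem.Chars.upperChar).toList := by
  induction t generalizing s with
  | nil => rfl
  | cons c t ih =>
    rw [PySem.List.enumerate_cons]
    cases t with
    | nil =>
      simp only [List.map_cons, List.length_cons, List.length_nil]
      rw [if_pos (by simp)]
      rfl
    | cons d t' =>
      simp only [List.map_cons]
      rw [if_neg (by simp only [List.length_cons, beq_iff_eq, Bool.or_eq_true]; push_cast; omega)]
      have := ih (s+1) (by omega)
      rw [show s + 1 + ((d :: t').length : Int) - 1 = s + ((c :: d :: t').length : Int) - 1 by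
        simp; omega] at this
      rw [this]
      simp

-- B's single combined pass is the tuple of the five per-pattern maps
theorem foldl_five (w : List Char) (mid n : Int) :
    (PySem.List.enumerate w 0).foldl
      (fun acc (ic : Int × Char) =>
        (acc.1 ++ [if PySem.Int.mod ic.1 2 == 0 then PySem.Chars.upperChar ic.2 else ic.2],
         acc.2.1 ++ [if PySem.Int.mod ic.1 2 == 1 then PySem.Chars.upperChar ic.2 else ic.2],
         acc.2.2.1 ++ [if ic.1 < mid then PySem.Chars.upperChar ic.2 else ic.2],
         acc.2.2.2.1 ++ [if mid ≤ ic.1 then PySem.Chars.upperChar ic.2 else ic.2],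
         acc.2.2.2.2 ++ [if ic.1 == 0 || ic.1 == n - 1 then PySem.Chars.upperChar ic.2 else ic.2]))
      (([], [], [], [], []) : List Char × List Char × List Char × List Char × List Char)
    = ((PySem.List.enumerate w 0).map (fun ic => if PySem.Int.mod ic.1 2 == 0 then PySem.Chars.upperChar ic.2 else ic.2),
       (PySem.List.enumerate w 0).map (fun ic => if PySem.Int.mod ic.1 2 == 1 then PySem.Chars.upperChar ic.2 else ic.2),
       (PySem.List.enumerate w 0).map (fun ic => if ic.1 < mid then PySem.Chars.upperChar ic.2 else ic.2),
       (PySem.List.enumerate w 0).map (fun ic => if mid ≤ ic.1 then PySem.Chars.upperChar ic.2 else ic.2),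
       (PySem.List.enumerate w 0).map (fun ic => if ic.1 == 0 || ic.1 == n - 1 then PySem.Chars.upperChar ic.2 else ic.2)) := by
  rw [PySem.List.foldl_prod_mk
        (f := fun acc (ic : Int × Char) => acc ++ [if PySem.Int.mod ic.1 2 == 0 then PySem.Chars.upperChar ic.2 else ic.2])
        (g := fun (acc : List Char × List Char × List Char × List Char) (ic : Int × Char) =>
          (acc.1 ++ [if PySem.Int.mod ic.1 2 == 1 then PySem.Chars.upperChar ic.2 else ic.2],
           acc.2.1 ++ [if ic.1 < mid then PySem.Chars.upperChar ic.2 else ic.2],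
           acc.2.2.1 ++ [if mid ≤ ic.1 then PySem.Chars.upperChar ic.2 else ic.2],
           acc.2.2.2 ++ [if ic.1 == 0 || ic.1 == n - 1 then PySem.Chars.upperChar ic.2 else ic.2]))]
  rw [PySem.List.foldl_prod_mk
        (f := fun acc (ic : Int × Char) => acc ++ [if PySem.Int.mod ic.1 2 == 1 then PySem.Chars.upperChar ic.2 else ic.2])
        (g := fun (acc : List Char × List Char × List Char) (ic : Int × Char) =>
          (acc.1 ++ [if ic.1 < mid then PySem.Chars.upperChar ic.2 else ic.2],
           acc.2.1 ++ [if mid ≤ ic.1 then PySem.Chars.upperChar ic.2 else ic.2],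
           acc.2.2 ++ [if ic.1 == 0 || ic.1 == n - 1 then PySem.Chars.upperChar ic.2 else ic.2]))]
  rw [PySem.List.foldl_prod_mk
        (f := fun acc (ic : Int × Char) => acc ++ [if ic.1 < mid then PySem.Chars.upperChar ic.2 else ic.2])
        (g := fun (acc : List Char × List Char) (ic : Int × Char) =>
          (acc.1 ++ [if mid ≤ ic.1 then PySem.Chars.upperChar ic.2 else ic.2],
           acc.2 ++ [if ic.1 == 0 || ic.1 == n - 1 then PySem.Chars.upperChar ic.2 else ic.2]))]
  rw [PySem.List.foldl_prod_mk
        (f := fun acc (ic : Int × Char) => acc ++ [if mid ≤ ic.1 then PySem.Chars.upperChar ic.2 else ic.2])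
        (g := fun acc (ic : Int × Char) => acc ++ [if ic.1 == 0 || ic.1 == n - 1 then PySem.Chars.upperChar ic.2 else ic.2])]
  simp only [PySem.List.foldl_append_singleton_eq_map, List.nil_append]

-- A's p5 (first+last upper, with the n < 2 fallback) equals B's per-index rule
theorem p5_eq (w : List Char) :
    (if 2 ≤ (w.length : Int) then
      pyFirstLast (PySem.List.pyGet? w 0) (PySem.List.pyGet? w (-1))
        (PySem.List.slice w (some 1) (some (-1)))
     else PySem.Chars.upper w)
    = (PySem.List.enumerate w 0).map
        (fun ic => if ic.1 == 0 || ic.1 == (w.length : Int) - 1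
                   then PySem.Chars.upperChar ic.2 else ic.2) := by
  match w with
  | [] => rfl
  | [c] =>
    rw [if_neg (by simp)]
    rfl
  | c :: d :: t =>
    rcases List.eq_nil_or_concat (d :: t) with h | ⟨ys, y, hys⟩
    · exact absurd h (by simp)
    rw [List.concat_eq_append] at hys
    rw [hys]
    rw [if_pos (by simp; omega)]
    rw [show PySem.List.pyGet? (c :: (ys ++ [y])) 0 = some c by
      rw [show (0:Int) = ((0:Nat):Int) by norm_num, PySem.List.pyGet?_natCast]; rfl]
    rw [show PySem.List.pyGet? (c :: (ys ++ [y])) (-1) = some y by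
      simp [PySem.List.pyGet?, PySem.List.pyIdx?]]
    rw [show PySem.List.slice (c :: (ys ++ [y])) (some 1) (some (-1)) = ys by
      simp [PySem.List.slice]]
    rw [PySem.List.enumerate_cons]
    simp only [List.map_cons]
    rw [if_pos (by simp)]
    rw [show (0:Int) + 1 = 1 by norm_num]
    rw [show ((c :: (ys ++ [y])).length : Int) - 1 = 1 + ((ys ++ [y]).length : Int) - 1 by
      simp]
    rw [map_enum_ends (ys ++ [y]) 1 (by omega)]
    simp [pyFirstLast]

theorem upper_eq_map (l : List Char) : PySem.Chars.upper l = l.map PySem.Chars.upperChar := rfl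

-- ===== VERDICT (by name: the statement is the Claim_ definition above) =====
theorem toggle_patterns_py_spec : Claim_equal_toggle_patterns_py := by
  intro word _
  unfold Spec_toggle_patterns_py
  simp only [toggle_patterns_py, toggle_patterns_py_alt]
  set w : List Char := PySem.Chars.lower word.toList with hw
  rw [foldl_five w (max 1 (PySem.Int.floordiv (w.length : Int) 2)) (w.length : Int)]
  have hm : max 1 (PySem.Int.floordiv ((w.length : Nat) : Int) 2) = ((max 1 (w.length / 2) : Nat) : Int) := by
    rw [show (2:Int) = ((2:Nat):Int) from rfl, PySem.Int.floordiv_natCast]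
    push_cast
    rfl
  rw [hm]
  rw [map_enum_if_lt_zero w (max 1 (w.length / 2)), map_enum_if_ge_zero w (max 1 (w.length / 2))]
  rw [PySem.List.slice_to_natCast, PySem.List.slice_from_natCast]
  rw [p5_eq w]
  simp only [upper_eq_map]
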